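-- pv_equiv track=rewrite | github.com/mahamadousylla/First-2-months-of-Python | lab6.py | list_of_words
-- ===== SOURCE A (Python) =====
-- def remove_punctuation(character):
--     '''removes punctuation from character'''
--     punctuation = '!"#$%&\'()*+,?-./:;<=>?@[\\]^_`{|}~'
--     for punct in punctuation:
--         if punct in character:
--            character = character.replace(punct, "")
--     return character.replace('  ', ' ')
--
-- def list_of_words(list_of_strings):
--     '''takes in a list of strings, removes punctuation, and returns a list
--     with individual words with whitespace removed'''
--     x=[]
--     for string in list_of_strings:
--         string = remove_punctuation(string)
--         string = string.split()
--         for word in string: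
--             if word != ' ':
--                 x.append(word)
--     return x
-- ===== SOURCE B (Python) =====
-- PUNCT = frozenset('!"#$%&\'()*+,?-./:;<=>?@[\\]^_`{|}~')
--
-- def list_of_words(list_of_strings):
--     '''takes in a list of strings, removes punctuation, and returns a list
--     with individual words with whitespace removed'''
--     words = []
--     for s in list_of_strings:
--         words.extend(''.join(c for c in s if c not in PUNCT).split())
--     return words
-- ===== Notes on version B (the rewrite author's own statement) =====
-- stated objective: faster
-- what changed: Replaces the per-punctuation-character whole-string replace passes (plus a double-space replace and a dead word != ' ' guard) with one single-pass character filter against a frozenset followed by split().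
import Mathlib
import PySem

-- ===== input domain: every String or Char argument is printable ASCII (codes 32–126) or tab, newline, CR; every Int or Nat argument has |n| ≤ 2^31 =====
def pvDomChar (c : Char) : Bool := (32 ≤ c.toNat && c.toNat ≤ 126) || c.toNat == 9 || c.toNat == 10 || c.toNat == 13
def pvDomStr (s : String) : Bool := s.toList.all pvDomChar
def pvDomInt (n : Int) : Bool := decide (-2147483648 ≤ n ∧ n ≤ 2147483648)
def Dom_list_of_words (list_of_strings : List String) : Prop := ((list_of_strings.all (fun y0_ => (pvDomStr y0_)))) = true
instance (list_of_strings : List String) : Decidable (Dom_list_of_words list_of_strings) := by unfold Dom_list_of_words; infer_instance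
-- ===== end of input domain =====

-- B replaces A's per-punctuation-character replace passes (and its redundant double-space
-- replace and dead word != ' ' guard) with a single character-filter pass followed by split().


-- ===== PORT A =====
-- the punctuation string literal from remove_punctuation (note: '?' occurs twice, as in A)
def pvPunctuation : String := "!\"#$%&'()*+,?-./:;<=>?@[\\]^_`{|}~"

def remove_punctuation (character : String) : String :=
  let character := pvPunctuation.toList.foldl
    (fun character punct =>
      if PySem.Str.isIn (String.ofList [punct]) character then
        PySem.Str.replace character (String.ofList [punct]) ""
      else character)
    character
  PySem.Str.replace character "  " " "

def list_of_words (list_of_strings : List String) : List String :=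
  list_of_strings.foldl
    (fun x string =>
      (PySem.Str.split₀ (remove_punctuation string)).foldl
        (fun x word => if word ≠ " " then x ++ [word] else x) x)
    []

-- ===== PORT B =====
def pvPunctSet : PySem.Set Char := PySem.Set.ofList pvPunctuation.toList

def list_of_words_alt (list_of_strings : List String) : List String :=
  list_of_strings.foldl
    (fun words s =>
      words ++ PySem.Str.split₀
        (String.ofList (s.toList.filter (fun c => !(PySem.Set.contains pvPunctSet c)))))
    []

-- ===== PRECONDITION & SPEC =====
def Spec_list_of_words (list_of_strings : List String) (out : List String) : Prop := out = list_of_words_alt list_of_strings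
instance (list_of_strings : List String) (out : List String) : Decidable (Spec_list_of_words list_of_strings out) := by unfold Spec_list_of_words; infer_instance

-- ===== CLAIM (what is proved, stated in full; the proofs are below) =====
def Claim_equal_list_of_words : Prop := ∀ (list_of_strings : List String), Dom_list_of_words list_of_strings → Spec_list_of_words list_of_strings (list_of_words list_of_strings)

-- ===== LEMMAS AND PROOFS =====

-- replacing a single-character string by "" is a character filter
theorem replace_single_go (c : Char) :
    ∀ (fuel : Nat) (l acc : List Char), l.length ≤ fuel →
      PySem.Chars.replace.go [c] [] fuel l acc
        = acc.reverse ++ l.filter (fun x => !(x == c)) := by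
  intro fuel
  induction fuel with
  | zero =>
    intro l acc h
    have : l = [] := List.eq_nil_of_length_eq_zero (Nat.le_zero.mp h)
    subst this
    rw [PySem.Chars.replace.go.eq_def]; simp
  | succ n ih =>
    intro l acc h
    cases l with
    | nil => rw [PySem.Chars.replace.go.eq_def]; simp
    | cons c' t =>
      rw [PySem.Chars.replace.go.eq_def]
      simp only [List.isPrefixOf, Bool.and_true, List.length_cons] at *
      by_cases hc : c == c'
      · simp only [hc, if_pos, List.length_nil, Nat.zero_add, List.drop_succ_cons,
          List.drop_zero, List.reverse_nil, List.nil_append]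
        rw [ih t acc (by omega)]
        have h2 : (c' == c) = true := by rw [BEq.comm]; exact hc
        simp [h2]
      · simp only [hc, Bool.false_eq_true, if_neg, not_false_iff]
        rw [ih t (c' :: acc) (by omega)]
        have h2 : (c' == c) = false := by
          rw [BEq.comm]; exact Bool.not_eq_true _ ▸ hc
        simp [h2]

theorem replace_single (s : List Char) (c : Char) :
    PySem.Chars.replace s [c] [] = s.filter (fun x => !(x == c)) := by
  rw [PySem.Chars.replace]
  simp only [List.isEmpty_cons, Bool.false_eq_true, if_neg]
  rw [replace_single_go c s.length s [] (le_refl _)]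
  simp

-- the result of replacing "  " by " " (leftmost, non-overlapping), as a structural recursion
def pvSquash : List Char → List Char
  | [] => []
  | [c] => [c]
  | c1 :: c2 :: t =>
    if c1 = ' ' ∧ c2 = ' ' then ' ' :: pvSquash t else c1 :: pvSquash (c2 :: t)

theorem replace_double_go :
    ∀ (fuel : Nat) (l acc : List Char), l.length ≤ fuel →
      PySem.Chars.replace.go [' ', ' '] [' '] fuel l acc = acc.reverse ++ pvSquash l := by
  intro fuel
  induction fuel with
  | zero =>
    intro l acc h
    have : l = [] := List.eq_nil_of_length_eq_zero (Nat.le_zero.mp h)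
    subst this
    rw [PySem.Chars.replace.go.eq_def]; simp [pvSquash]
  | succ n ih =>
    intro l acc h
    match l with
    | [] => rw [PySem.Chars.replace.go.eq_def]; simp [pvSquash]
    | [c1] =>
      rw [PySem.Chars.replace.go.eq_def]
      simp only []
      have hp : [' ', ' '].isPrefixOf [c1] = false := by
        simp [List.isPrefixOf]
      rw [hp]
      simp only [Bool.false_eq_true, if_neg, not_false_iff]
      rw [ih [] (c1 :: acc) (by simp)]
      simp [pvSquash]
    | c1 :: c2 :: t =>
      rw [PySem.Chars.replace.go.eq_def]
      simp only []
      simp only [List.length_cons] at h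
      by_cases hsp : c1 = ' ' ∧ c2 = ' '
      · obtain ⟨h1, h2⟩ := hsp
        subst h1; subst h2
        have hp : [' ', ' '].isPrefixOf (' ' :: ' ' :: t) = true := by
          simp [List.isPrefixOf]
        rw [hp]
        simp only [if_pos]
        rw [show List.drop ([' ',' '].length) (' ' :: ' ' :: t) = t from rfl]
        rw [ih t ([' '].reverse ++ acc) (by omega)]
        simp [pvSquash]
      · have hp : [' ', ' '].isPrefixOf (c1 :: c2 :: t) = false := by
          simp [List.isPrefixOf]
          intro h1 h2; exact hsp ⟨h1.symm, h2.symm⟩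
        rw [hp]
        simp only [Bool.false_eq_true, if_neg, not_false_iff]
        rw [ih (c2 :: t) (c1 :: acc) (by simp; omega)]
        simp [pvSquash, hsp]

theorem replace_double (s : List Char) :
    PySem.Chars.replace s [' ', ' '] [' '] = pvSquash s := by
  rw [PySem.Chars.replace]
  simp only [List.isEmpty_cons, Bool.false_eq_true, if_neg]
  rw [replace_double_go s.length s [] (le_refl _)]
  simp

-- split() cannot see the double-space squash
theorem split₀_go_squash :
    ∀ (l cur : List Char) (acc : List (List Char)),
      PySem.Chars.split₀.go (pvSquash l) cur acc = PySem.Chars.split₀.go l cur acc := by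
  intro l
  induction l using pvSquash.induct with
  | case1 => intro cur acc; rfl
  | case2 c => intro cur acc; rfl
  | case3 c1 c2 t hsp ih =>
    intro cur acc
    obtain ⟨h1, h2⟩ := hsp
    subst h1; subst h2
    rw [show pvSquash (' ' :: ' ' :: t) = ' ' :: pvSquash t by simp [pvSquash]]
    rw [PySem.Chars.split₀.go.eq_def]
    conv_rhs => rw [PySem.Chars.split₀.go.eq_def]
    simp only []
    have hs : PySem.Chars.isspace ' ' = true := by decide
    rw [hs]
    simp only [if_pos]
    by_cases hc : cur.isEmpty
    · rw [if_pos hc, if_pos hc]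
      conv_rhs => rw [PySem.Chars.split₀.go.eq_def]
      simp only [hs, if_pos, List.isEmpty_nil, if_true]
      exact ih [] acc
    · rw [if_neg hc, if_neg hc]
      conv_rhs => rw [PySem.Chars.split₀.go.eq_def]
      simp only [hs, if_pos, List.isEmpty_nil, if_true]
      exact ih [] (cur.reverse :: acc)
  | case4 c1 c2 t hsp ih =>
    intro cur acc
    rw [show pvSquash (c1 :: c2 :: t) = c1 :: pvSquash (c2 :: t) by
      rw [pvSquash]; rw [if_neg hsp]]
    rw [PySem.Chars.split₀.go.eq_def]
    conv_rhs => rw [PySem.Chars.split₀.go.eq_def]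
    simp only []
    by_cases hs : PySem.Chars.isspace c1
    · rw [hs]; simp only [if_pos]
      by_cases hc : cur.isEmpty
      · rw [if_pos hc, if_pos hc]; exact ih [] acc
      · rw [if_neg hc, if_neg hc]; exact ih [] (cur.reverse :: acc)
    · simp only [Bool.not_eq_true] at hs
      rw [hs]
      simp only [Bool.false_eq_true, if_neg, not_false_iff]
      exact ih (c1 :: cur) acc

-- every word split() produces is non-space, in particular never " "
theorem split₀_go_words :
    ∀ (l cur : List Char) (acc : List (List Char)),
      (∀ w ∈ acc, w ≠ [' ']) → (∀ ch ∈ cur, PySem.Chars.isspace ch = false) →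
      ∀ w ∈ PySem.Chars.split₀.go l cur acc, w ≠ [' '] := by
  intro l
  induction l with
  | nil =>
    intro cur acc hacc hcur
    rw [PySem.Chars.split₀.go.eq_def]
    simp only []
    by_cases hc : cur.isEmpty
    · rw [if_pos hc]; intro w hw; exact hacc w (List.mem_reverse.mp hw)
    · rw [if_neg hc]
      intro w hw
      rcases List.mem_cons.mp (List.mem_reverse.mp hw) with h | h
      · subst h
        intro hq
        have hm : ' ' ∈ cur := by
          have := congrArg List.reverse hq
          simp at this
          simp [this]
        have := hcur ' ' hm
        revert this; decide
      · exact hacc w h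
  | cons c t ih =>
    intro cur acc hacc hcur
    rw [PySem.Chars.split₀.go.eq_def]
    simp only []
    by_cases hs : PySem.Chars.isspace c
    · rw [hs]; simp only [if_pos]
      by_cases hc : cur.isEmpty
      · rw [if_pos hc]; exact ih [] acc hacc (by simp)
      · rw [if_neg hc]
        refine ih [] (cur.reverse :: acc) ?_ (by simp)
        intro w hw
        rcases List.mem_cons.mp hw with h | h
        · subst h
          intro hq
          have hm : ' ' ∈ cur := by
            have := congrArg List.reverse hq
            simp at this
            simp [this]
          have := hcur ' ' hm
          revert this; decide
        · exact hacc w h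
    · simp only [Bool.not_eq_true] at hs
      rw [hs]
      simp only [Bool.false_eq_true, if_neg, not_false_iff]
      refine ih (c :: cur) acc hacc ?_
      intro ch hch
      rcases List.mem_cons.mp hch with h | h
      · subst h; exact hs
      · exact hcur ch h

theorem split₀_words (l : List Char) : ∀ w ∈ PySem.Chars.split₀ l, w ≠ [' '] := by
  rw [PySem.Chars.split₀]
  exact split₀_go_words l [] [] (by simp) (by simp)

-- A's punctuation loop is one character filter
theorem foldA (ps : List Char) :
    ∀ (ch : String),
      ps.foldl
        (fun character punct =>
          if PySem.Str.isIn (String.ofList [punct]) character then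
            PySem.Str.replace character (String.ofList [punct]) ""
          else character) ch
      = String.ofList (ch.toList.filter (fun x => !(ps.contains x))) := by
  induction ps with
  | nil => intro ch; simp
  | cons p ps ih =>
    intro ch
    rw [List.foldl_cons, ih]
    have hstep : (if PySem.Str.isIn (String.ofList [p]) ch then
            PySem.Str.replace ch (String.ofList [p]) ""
          else ch) = String.ofList (ch.toList.filter (fun x => !(x == p))) := by
      by_cases hin : PySem.Str.isIn (String.ofList [p]) ch
      · rw [if_pos hin]
        rw [PySem.Str.replace]
        congr 1
        rw [show (String.ofList [p]).toList = [p] by simp,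
            show ("" : String).toList = [] by rfl]
        exact replace_single ch.toList p
      · rw [if_neg hin]
        have hnm : p ∉ ch.toList := by
          intro hm
          apply hin
          rw [PySem.Str.isIn, show (String.ofList [p]).toList = [p] by simp,
              PySem.Chars.isIn_iff_infix]
          exact (List.singleton_infix_iff p ch.toList).mpr hm
        rw [List.filter_eq_self.mpr ?h, String.ofList_toList]
        case h =>
          intro a ha
          cases h : (a == p)
          · rfl
          · exact absurd (beq_iff_eq.mp h ▸ ha) hnm
    rw [hstep]
    simp only [String.toList_ofList]
    rw [List.filter_filter]
    congr 1
    exact List.filter_congr (fun x _ => by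
      simp only [List.contains_cons, Bool.not_or]
      rw [Bool.and_comm])

-- the set lookup in B is membership in the punctuation characters
theorem contains_punctSet (c : Char) :
    PySem.Set.contains pvPunctSet c = pvPunctuation.toList.contains c := by
  cases h : pvPunctuation.toList.contains c
  · simp_all [pvPunctSet, PySem.Set.contains, List.contains_eq_mem, PySem.Set.mem_ofList]
  · simp_all [pvPunctSet, PySem.Set.contains, List.contains_eq_mem, PySem.Set.mem_ofList]

-- A's word-appending guard loop is a filter
theorem guard_fold :
    ∀ (l x : List String),
      l.foldl (fun x word => if word ≠ " " then x ++ [word] else x) x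
        = x ++ l.filter (fun w => !(w == " ")) := by
  intro l
  induction l with
  | nil => intro x; simp
  | cons w t ih =>
    intro x
    rw [List.foldl_cons]
    by_cases h : w = " "
    · subst h
      rw [if_neg (by simp)]
      rw [ih x]
      simp
    · rw [if_pos h]
      rw [ih (x ++ [w])]
      have hb : (w == " ") = false := by
        cases hq : (w == " ")
        · rfl
        · exact absurd (beq_iff_eq.mp hq) h
      simp [hb]

-- A's per-string processing equals B's
theorem per_string (s : String) (x : List String) :
    (PySem.Str.split₀ (remove_punctuation s)).foldl
        (fun x word => if word ≠ " " then x ++ [word] else x) x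
    = x ++ PySem.Str.split₀
        (String.ofList (s.toList.filter (fun c => !(PySem.Set.contains pvPunctSet c)))) := by
  rw [guard_fold]
  refine congrArg (fun y => x ++ y) ?_
  have hbase :
      (s.toList.filter (fun c => !(PySem.Set.contains pvPunctSet c)))
        = s.toList.filter (fun x => !(pvPunctuation.toList.contains x)) :=
    List.filter_congr (fun c _ => by rw [contains_punctSet])
  rw [hbase]
  set base := s.toList.filter (fun x => !(pvPunctuation.toList.contains x)) with hb
  have hrp : remove_punctuation s = String.ofList (pvSquash base) := by
    simp only [remove_punctuation]
    rw [foldA, PySem.Str.replace]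
    congr 1
    rw [String.toList_ofList,
        show ("  " : String).toList = [' ', ' '] by rfl,
        show (" " : String).toList = [' '] by rfl]
    exact replace_double base
  rw [hrp]
  rw [PySem.Str.split₀, PySem.Str.split₀, String.toList_ofList, String.toList_ofList]
  rw [show PySem.Chars.split₀ (pvSquash base) = PySem.Chars.split₀ base by
    rw [PySem.Chars.split₀, PySem.Chars.split₀]; exact split₀_go_squash base [] []]
  rw [List.filter_map]
  rw [List.filter_eq_self.mpr]
  intro w hw
  have hne := split₀_words base w hw
  simp only [Function.comp]
  cases hq : (String.ofList w == " ")
  · rfl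
  · exfalso
    apply hne
    have := congrArg String.toList (beq_iff_eq.mp hq)
    rw [String.toList_ofList] at this
    rw [this]; rfl

-- ===== VERDICT (by name: the statement is the Claim_ definition above) =====
theorem list_of_words_spec : Claim_equal_list_of_words := by
  intro xs _
  unfold Spec_list_of_words list_of_words list_of_words_alt
  exact PySem.List.foldl_congr_mem xs _ _ [] (fun acc s _ => per_string s acc)
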